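-- pv_equiv track=rewrite | github.com/miliar/Code_Jam_Webscraper | solutions_python/Problem_201/427.py | solve
-- ===== SOURCE A (Python) =====
-- from collections import deque
--
-- def solve(n, k):
-- 	q = deque([[n, 1]])
-- 	while True:
-- 		l = q[0][0]-1
-- 		x, y = l//2+l%2, l//2
-- 		k -= q[0][1]
-- 		if k <= 0: return x, y
-- 		if q[-1][0] == x: q[-1][1] += q[0][1]
-- 		else: q.append([x, q[0][1]])
-- 		if q[-1][0] == y: q[-1][1] += q[0][1]
-- 		else: q.append([y, q[0][1]])
-- 		q.popleft()
-- ===== SOURCE B (Python) =====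
-- def solve(n, k):
--     # serving order splits the largest gap first; person kk sits in splitting
--     # generation g = kk.bit_length()-1, whose at most two gap sizes come from one divmod
--     kk = max(k, 1)  # the first split is returned for any k <= 1
--     g = kk.bit_length() - 1
--     p = 2 ** g
--     t = n - (p - 1)
--     s, r = divmod(t, p)
--     size = s + 1 if kk - p < r else s
--     l = size - 1
--     return l // 2 + l % 2, l // 2
-- ===== Notes on version B (the rewrite author's own statement) =====
-- stated objective: simpler
-- what changed: Replaced the deque simulation of repeated largest-gap splitting with a direct closed form: person max(k,1) lands in splitting generation g = bit_length-1, and the at most two gap sizes of that generation with their counts come from one divmod of n-(2**g-1) by 2**g.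
-- outside the precondition, e.g. on solve(1, 4): A returns (-1, -1), B returns (0, -1); on solve(-1, 2): A raises IndexError, B returns (-1, -1)
import Mathlib
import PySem

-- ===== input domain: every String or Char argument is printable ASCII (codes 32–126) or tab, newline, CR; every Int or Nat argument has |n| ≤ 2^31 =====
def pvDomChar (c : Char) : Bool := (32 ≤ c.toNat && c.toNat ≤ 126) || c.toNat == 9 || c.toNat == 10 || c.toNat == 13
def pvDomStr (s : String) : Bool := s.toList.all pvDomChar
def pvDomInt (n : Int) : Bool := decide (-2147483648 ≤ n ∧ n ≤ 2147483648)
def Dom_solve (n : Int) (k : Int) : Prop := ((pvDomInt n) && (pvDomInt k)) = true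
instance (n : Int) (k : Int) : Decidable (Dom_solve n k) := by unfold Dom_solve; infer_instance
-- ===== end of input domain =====

-- B replaces A's deque simulation of gap splitting by the closed form for generation k.bit_length()-1 (objective: simpler).

-- ===== PORT A =====
-- 'if q[-1][0] == v: q[-1][1] += c else: q.append([v, c])'
def pvAppendMerge (q : List (Int × Int)) (v c : Int) : List (Int × Int) :=
  match q.getLast? with
  | some (lv, lc) => if lv = v then q.dropLast ++ [(lv, lc + c)] else q ++ [(v, c)]
  | none => q ++ [(v, c)]

-- the 'while True' loop; fuel only makes it total (inside Pre_ each iteration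
-- decreases k by at least 1, so fuel k.toNat + 1 is never exhausted)
def solveLoop : Nat → List (Int × Int) → Int → Int × Int
  | 0, _, _ => (0, 0)
  | _ + 1, [], _ => (0, 0)   -- Python would raise IndexError; unreachable inside Pre_
  | f + 1, (s0, c0) :: rest, k =>
      let l := s0 - 1
      let x := PySem.Int.floordiv l 2 + PySem.Int.mod l 2
      let y := PySem.Int.floordiv l 2
      if k - c0 ≤ 0 then (x, y)
      else
        let q1 := pvAppendMerge ((s0, c0) :: rest) x c0
        -- Python re-reads q[0][1] for the second merge/append: the x-merge may
        -- have hit the front itself when the deque had a single element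
        let c1 := (q1.headD (0, 0)).2
        let q2 := pvAppendMerge q1 y c1
        solveLoop f (q2.drop 1) (k - c0)

def solve (n : Int) (k : Int) : Int × Int := solveLoop (k.toNat + 1) [(n, 1)] k

-- ===== PORT B =====
def solve_alt (n : Int) (k : Int) : Int × Int :=
  let kk : Int := max k 1
  let g : Nat := PySem.Int.bitLength kk - 1
  let p : Int := 2 ^ g
  let t : Int := n - (p - 1)
  let s : Int := PySem.Int.floordiv t p
  let r : Int := PySem.Int.mod t p
  let size : Int := if kk - p < r then s + 1 else s
  let l : Int := size - 1
  (PySem.Int.floordiv l 2 + PySem.Int.mod l 2, PySem.Int.floordiv l 2)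

-- ===== PRECONDITION & SPEC =====
-- Pre_ excludes only the beyond-capacity inputs 2 ≤ k ∧ n < k (more people than stalls, outside the
-- problem's domain): there A's deque walks zero/negative "gap sizes" and either raises IndexError or
-- returns an accident of leftover loop state, which often still coincides with B's closed form but
-- differs once the walk reaches negative sizes (see the cites).  (For every k ≤ 1, A returns the
-- first split, which B reproduces by clamping k to 1, so those inputs stay inside Pre_.)
def Pre_solve (n : Int) (k : Int) : Prop := k ≤ 1 ∨ k ≤ n
instance (n : Int) (k : Int) : Decidable (Pre_solve n k) := by unfold Pre_solve; infer_instance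
def pvWitness_solve : Int × Int := (10, 4)
def Spec_solve (n : Int) (k : Int) (out : Int × Int) : Prop := out = solve_alt n k
instance (n : Int) (k : Int) (out : Int × Int) : Decidable (Spec_solve n k out) := by unfold Spec_solve; infer_instance

-- ===== CLAIM (what is proved, stated in full; the proofs are below) =====
def Claim_equal_solve : Prop := ∀ (n : Int) (k : Int), Dom_solve n k → Pre_solve n k → Spec_solve n k (solve n k)

-- ===== LEMMAS AND PROOFS =====

-- the pair A and B both return for a chosen gap size sz (the split of l = sz-1)
def pysplit (sz : Int) : Int × Int :=
  (PySem.Int.floordiv (sz - 1) 2 + PySem.Int.mod (sz - 1) 2, PySem.Int.floordiv (sz - 1) 2)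

-- floor division by 2, packaged for omega-style use
theorem fd2 (a q : Int) (h : a = 2 * q ∨ a = 2 * q + 1) :
    PySem.Int.floordiv a 2 = q ∧ PySem.Int.mod a 2 = a - 2 * q := by
  have h1 : PySem.Int.floordiv a 2 = q :=
    (PySem.Int.floordiv_eq_iff_of_pos (by norm_num)).mpr ⟨by omega, by omega⟩
  have h2 := PySem.Int.floordiv_mul_add_mod a 2
  rw [h1] at h2
  exact ⟨h1, by omega⟩

-- integrality steps, stated over plain variables so omega applies at any instantiation
theorem pos_of_not_le {a : Int} (h : ¬ a ≤ 0) : 1 ≤ a := by omega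
theorem succ_le_of_lt {a b : Int} (h : a < b) : a + 1 ≤ b := by omega

theorem am1 (a b v c : Int) :
    pvAppendMerge [(a, b)] v c = if a = v then [(a, b + c)] else [(a, b), (v, c)] := by
  simp [pvAppendMerge]

theorem am2 (p : Int × Int) (a b v c : Int) :
    pvAppendMerge [p, (a, b)] v c = if a = v then [p, (a, b + c)] else [p, (a, b), (v, c)] := by
  simp [pvAppendMerge]

theorem am3 (p q : Int × Int) (a b v c : Int) :
    pvAppendMerge [p, q, (a, b)] v c = if a = v then [p, q, (a, b + c)] else [p, q, (a, b), (v, c)] := by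
  simp [pvAppendMerge]

theorem bitLen_eq (k : Int) (g : Nat) (h1 : (2 : Int) ^ g ≤ k) (h2 : k < 2 ^ (g + 1)) :
    PySem.Int.bitLength k = g + 1 := by
  have hk0 : 0 < k := lt_of_lt_of_le (pow_pos (by norm_num) g) h1
  have e : (k.natAbs : Int) = k := Int.natAbs_of_nonneg hk0.le
  have h1' : 2 ^ g ≤ k.natAbs := by rw [← e] at h1; exact_mod_cast h1
  have h2' : k.natAbs < 2 ^ (g + 1) := by rw [← e] at h2; exact_mod_cast h2
  have hB1 := PySem.Int.two_pow_bitLength_le k hk0.ne'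
  have hB2 := PySem.Int.lt_two_pow_bitLength k
  have hgB : g < PySem.Int.bitLength k :=
    (Nat.pow_lt_pow_iff_right (by norm_num)).mp (lt_of_le_of_lt h1' hB2)
  have hBg : PySem.Int.bitLength k - 1 < g + 1 :=
    (Nat.pow_lt_pow_iff_right (by norm_num)).mp (lt_of_le_of_lt hB1 h2')
  omega

theorem alt_char (n k s r : Int) (g : Nat)
    (hk1 : (2 : Int) ^ g ≤ k) (hk2 : k < 2 ^ (g + 1))
    (hr : 0 ≤ r) (hr2 : r < 2 ^ g)
    (hn : n = 2 ^ g - 1 + (s * 2 ^ g + r)) :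
    solve_alt n k = pysplit (if k - 2 ^ g < r then s + 1 else s) := by
  have hP0 : (0 : Int) < 2 ^ g := pow_pos (by norm_num) g
  have ht : n - ((2 : Int) ^ g - 1) = s * 2 ^ g + r := by linarith
  have hd : PySem.Int.floordiv (s * 2 ^ g + r) (2 ^ g) = s :=
    (PySem.Int.floordiv_eq_iff_of_pos hP0).mpr ⟨by linarith, by nlinarith⟩
  have hm : PySem.Int.mod (s * 2 ^ g + r) (2 ^ g) = r := by
    have h2 := PySem.Int.floordiv_mul_add_mod (s * 2 ^ g + r) (2 ^ g)
    rw [hd] at h2; linarith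
  have hk1' : (1 : Int) ≤ k := le_trans (by simpa using succ_le_of_lt hP0) hk1
  simp only [solve_alt, max_eq_left hk1', bitLen_eq k g hk1 hk2,
    Nat.add_sub_cancel, ht, hd, hm]
  split_ifs <;> rfl

theorem alt_one (n k : Int) (hk : k ≤ 1) : solve_alt n k = pysplit n := by
  have hmax : max k 1 = 1 := max_eq_right hk
  have hb : PySem.Int.bitLength (1 : Int) = 1 := by decide
  have hd : PySem.Int.floordiv n 1 = n :=
    (PySem.Int.floordiv_eq_iff_of_pos (by norm_num)).mpr ⟨by linarith, by linarith⟩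
  have hm : PySem.Int.mod n 1 = 0 := by
    have h2 := PySem.Int.floordiv_mul_add_mod n 1
    rw [hd] at h2; linarith
  simp only [solve_alt, hmax, hb]
  norm_num [hd, hm, pysplit, PySem.Int.floordiv, PySem.Int.mod]

theorem loop_eq (f : Nat) : ∀ (g : Nat) (n k s r : Int),
    1 ≤ k → k ≤ n →
    (2 : Int) ^ g ≤ k →
    0 ≤ r → r < 2 ^ g →
    n = 2 ^ g - 1 + (s * 2 ^ g + r) →
    k - (2 ^ g - 1) ≤ (f : Int) →
    solveLoop f (if r = 0 then [(s, (2 : Int) ^ g)] else [(s + 1, r), (s, 2 ^ g - r)])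
        (k - (2 ^ g - 1)) = solve_alt n k := by
  induction f using Nat.strong_induction_on with
  | _ f IH =>
  intro g n k s r hk1 hkn hPk hr0 hr1 hn hf
  have hP0 : (0 : Int) < 2 ^ g := pow_pos (by norm_num) g
  have hP1 : (1 : Int) ≤ 2 ^ g := by simpa using succ_le_of_lt hP0
  have hPP : (2 : Int) ^ (g + 1) = 2 * 2 ^ g := by ring
  obtain ⟨f1, rfl⟩ : ∃ f1, f = f1 + 1 := by
    cases f with
    | zero => exfalso; simp at hf; linarith
    | succ m => exact ⟨m, rfl⟩
  by_cases hr : r = 0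
  · -- full generation is a single group [(s, 2^g)]
    subst hr
    rw [if_pos rfl]
    simp only [solveLoop]
    by_cases hret : k - (2 ^ g - 1) - 2 ^ g ≤ 0
    · rw [if_pos hret]
      rw [alt_char n k s 0 g hPk (by rw [hPP]; linarith) le_rfl hP0 hn]
      rw [if_neg (by linarith)]
      rfl
    · rw [if_neg hret]
      have hgt := pos_of_not_le hret
      have hk2P : 2 * 2 ^ g ≤ k := by linarith
      have hs2 : 2 ≤ s := by
        by_contra hc
        have : s * 2 ^ g ≤ 1 * 2 ^ g := mul_le_mul_of_nonneg_right (by omega) hP0.le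
        linarith
      rcases Int.even_or_odd s with ⟨u, hu⟩ | ⟨u, hu⟩
      · -- s = u + u : children are u and u-1
        obtain ⟨hfd, hmd⟩ := fd2 (s - 1) (u - 1) (by omega)
        rw [hfd, hmd]
        have hx : u - 1 + (s - 1 - 2 * (u - 1)) = u := by omega
        rw [hx]
        rw [am1, if_neg (by omega : ¬ s = u)]
        simp only [List.headD_cons]
        rw [am2, if_neg (by omega : ¬ u = u - 1)]
        simp only [List.drop_succ_cons, List.drop_zero]
        have H := IH f1 (by omega) (g + 1) n k (u - 1) (2 ^ g) hk1 hkn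
          (by rw [hPP]; linarith) hP0.le (by rw [hPP]; linarith)
          (by rw [hPP]; linear_combination hn + (2 : Int) ^ g * hu)
          (by push_cast at hf ⊢; rw [hPP]; linarith)
        rw [if_neg hP0.ne'] at H
        have e1 : u - 1 + 1 = u := by ring
        have e2 : (2 : Int) ^ (g + 1) - 2 ^ g = 2 ^ g := by rw [hPP]; ring
        rw [e1, e2] at H
        have e3 : k - (2 ^ g - 1) - 2 ^ g = k - (2 ^ (g + 1) - 1) := by rw [hPP]; ring
        rw [e3]
        exact H
      · -- s = 2u + 1 : both children are u
        obtain ⟨hfd, hmd⟩ := fd2 (s - 1) u (by omega)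
        rw [hfd, hmd]
        have hx : u + (s - 1 - 2 * u) = u := by omega
        rw [hx]
        rw [am1, if_neg (by omega : ¬ s = u)]
        simp only [List.headD_cons]
        rw [am2, if_pos rfl]
        simp only [List.drop_succ_cons, List.drop_zero]
        have H := IH f1 (by omega) (g + 1) n k u 0 hk1 hkn
          (by rw [hPP]; linarith) le_rfl (by rw [hPP]; linarith)
          (by rw [hPP]; linear_combination hn + (2 : Int) ^ g * hu)
          (by push_cast at hf ⊢; rw [hPP]; linarith)
        rw [if_pos rfl] at H
        have e2 : (2 : Int) ^ (g + 1) = 2 ^ g + 2 ^ g := by rw [hPP]; ring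
        rw [e2] at H
        have e3 : k - (2 ^ g - 1) - 2 ^ g = k - (2 ^ g + 2 ^ g - 1) := by ring
        rw [e3]
        exact H
  · -- generation has two groups [(s+1, r), (s, 2^g - r)]
    rw [if_neg hr]
    have hr1' : 1 ≤ r := by omega
    have hX2 : (2 : Int) ≤ 2 ^ g := by have := succ_le_of_lt hr1; linarith
    simp only [solveLoop]
    by_cases hret1 : k - (2 ^ g - 1) - r ≤ 0
    · -- k-th person sits in a gap of the larger size s+1
      rw [if_pos hret1]
      rw [alt_char n k s r g hPk (by rw [hPP]; linarith) hr0 hr1 hn]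
      rw [if_pos (by linarith)]
      rfl
    · rw [if_neg hret1]
      have hgt := pos_of_not_le hret1
      have hs1 : 1 ≤ s := by
        by_contra hc
        have : s * 2 ^ g ≤ 0 * 2 ^ g := mul_le_mul_of_nonneg_right (by omega) hP0.le
        linarith
      obtain ⟨f2, rfl⟩ : ∃ f2, f1 = f2 + 1 := by
        cases f1 with
        | zero => exfalso; push_cast at hf; linarith
        | succ m => exact ⟨m, rfl⟩
      rcases Int.even_or_odd s with ⟨u, hu⟩ | ⟨u, hu⟩
      · -- s = u + u (so s ≥ 2) : children of s+1 are u and u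
        have hu1 : 1 ≤ u := by omega
        obtain ⟨hfd, hmd⟩ := fd2 (s + 1 - 1) u (by omega)
        rw [hfd, hmd]
        have hx : u + (s + 1 - 1 - 2 * u) = u := by omega
        rw [hx]
        rw [am2, if_neg (by omega : ¬ s = u)]
        simp only [List.headD_cons]
        rw [am3, if_pos rfl]
        simp only [List.drop_succ_cons, List.drop_zero]
        simp only [solveLoop]
        obtain ⟨hfd2, hmd2⟩ := fd2 (s - 1) (u - 1) (by omega)
        rw [hfd2, hmd2]
        have hx2 : u - 1 + (s - 1 - 2 * (u - 1)) = u := by omega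
        rw [hx2]
        by_cases hret2 : k - (2 ^ g - 1) - r - (2 ^ g - r) ≤ 0
        · -- k-th person sits in a gap of the smaller size s
          rw [if_pos hret2]
          rw [alt_char n k s r g hPk (by rw [hPP]; linarith) hr0 hr1 hn]
          rw [if_neg (by linarith)]
          simp only [pysplit, hfd2, hmd2, Prod.mk.injEq]
          exact ⟨by omega, trivial⟩
        · rw [if_neg hret2]
          have hgt2 := pos_of_not_le hret2
          rw [am2, if_pos rfl]
          simp only [List.headD_cons]
          rw [am2, if_neg (by omega : ¬ u = u - 1)]
          simp only [List.drop_succ_cons, List.drop_zero]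
          have H := IH f2 (by omega) (g + 1) n k (u - 1) (2 ^ g + r) hk1 hkn
            (by rw [hPP]; linarith) (by linarith) (by rw [hPP]; linarith)
            (by rw [hPP]; linear_combination hn + (2 : Int) ^ g * hu)
            (by push_cast at hf ⊢; rw [hPP]; linarith)
          rw [if_neg (by linarith : ¬ (2 : Int) ^ g + r = 0)] at H
          have e1 : u - 1 + 1 = u := by ring
          have e2 : (2 : Int) ^ (g + 1) - (2 ^ g + r) = 2 ^ g - r := by rw [hPP]; ring
          rw [e1, e2] at H
          have e4 : r + r + (2 ^ g - r) = 2 ^ g + r := by ring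
          rw [e4]
          have e3 : k - (2 ^ g - 1) - r - (2 ^ g - r) = k - (2 ^ (g + 1) - 1) := by
            rw [hPP]; ring
          rw [e3]
          exact H
      · -- s = 2u + 1 : children of s+1 are u+1 and u
        by_cases hu0 : u = 0
        · -- s = 1 : every remaining gap has size ≤ 1, the k-th person gets a size-1 gap
          have hs1' : s = 1 := by omega
          have hn1 : n = 2 * 2 ^ g + r - 1 := by rw [hs1'] at hn; linarith
          obtain ⟨hfd, hmd⟩ := fd2 (s + 1 - 1) 0 (by omega)
          rw [hfd, hmd]
          have hx : (0 : Int) + (s + 1 - 1 - 2 * 0) = 1 := by omega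
          rw [hx]
          rw [am2, if_pos (by omega : s = 1)]
          simp only [List.headD_cons]
          rw [am2, if_neg (by omega : ¬ s = 0)]
          simp only [List.drop_succ_cons, List.drop_zero]
          simp only [solveLoop]
          obtain ⟨hfd2, hmd2⟩ := fd2 (s - 1) 0 (by omega)
          rw [hfd2, hmd2]
          have hx2 : (0 : Int) + (s - 1 - 2 * 0) = 0 := by omega
          rw [hx2]
          rw [if_pos (by linarith : k - (2 ^ g - 1) - r - (2 ^ g - r + r) ≤ 0)]
          by_cases hk2 : k < 2 * 2 ^ g
          · rw [alt_char n k s r g hPk (by rw [hPP]; exact hk2) hr0 hr1 hn]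
            rw [if_neg (by linarith)]
            simp only [pysplit, hfd2, hmd2, Prod.mk.injEq]
            exact ⟨by omega, trivial⟩
          · rw [not_lt] at hk2
            rw [alt_char n k 0 r (g + 1) (by rw [hPP]; exact hk2)
              (by have h4 : (2 : Int) ^ (g + 1 + 1) = 4 * 2 ^ g := by ring
                  rw [h4]; linarith)
              hr0 (by rw [hPP]; linarith) (by rw [hPP]; linarith)]
            rw [if_pos (by rw [hPP]; linarith)]
            decide
        · -- s ≥ 3
          obtain ⟨hfd, hmd⟩ := fd2 (s + 1 - 1) u (by omega)
          rw [hfd, hmd]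
          have hx : u + (s + 1 - 1 - 2 * u) = u + 1 := by omega
          rw [hx]
          rw [am2, if_neg (by omega : ¬ s = u + 1)]
          simp only [List.headD_cons]
          rw [am3, if_neg (by omega : ¬ u + 1 = u)]
          simp only [List.drop_succ_cons, List.drop_zero]
          simp only [solveLoop]
          obtain ⟨hfd2, hmd2⟩ := fd2 (s - 1) u (by omega)
          rw [hfd2, hmd2]
          have hx2 : u + (s - 1 - 2 * u) = u := by omega
          rw [hx2]
          by_cases hret2 : k - (2 ^ g - 1) - r - (2 ^ g - r) ≤ 0
          · rw [if_pos hret2]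
            rw [alt_char n k s r g hPk (by rw [hPP]; linarith) hr0 hr1 hn]
            rw [if_neg (by linarith)]
            simp only [pysplit, hfd2, hmd2, Prod.mk.injEq]
            exact ⟨by omega, trivial⟩
          · rw [if_neg hret2]
            have hgt2 := pos_of_not_le hret2
            rw [am3, if_pos rfl]
            simp only [List.headD_cons]
            rw [am3, if_pos rfl]
            simp only [List.drop_succ_cons, List.drop_zero]
            have H := IH f2 (by omega) (g + 1) n k u r hk1 hkn
              (by rw [hPP]; linarith) hr0 (by rw [hPP]; linarith)
              (by rw [hPP]; linear_combination hn + (2 : Int) ^ g * hu)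
              (by push_cast at hf ⊢; rw [hPP]; linarith)
            rw [if_neg hr] at H
            have e2 : (2 : Int) ^ (g + 1) - r = 2 ^ g - r + (2 ^ g - r) + r := by
              rw [hPP]; ring
            rw [e2] at H
            have e4 : r + (2 ^ g - r) + (2 ^ g - r) = 2 ^ g - r + (2 ^ g - r) + r := by ring
            rw [e4]
            have e3 : k - (2 ^ g - 1) - r - (2 ^ g - r) = k - (2 ^ (g + 1) - 1) := by
              rw [hPP]; ring
            rw [e3]
            exact H

-- ===== VERDICT (by name: the statement is the Claim_ definition above) =====
theorem solve_spec : Claim_equal_solve := by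
  intro n k _ hpre
  unfold Spec_solve solve
  by_cases hk2 : 2 ≤ k
  · have hkn : k ≤ n := by
      rcases hpre with h | h
      · omega
      · exact h
    have H := loop_eq (k.toNat + 1) 0 n k n 0 (by omega) hkn (by simpa using (by omega : (1:Int) ≤ k))
      le_rfl (by norm_num) (by norm_num) (by push_cast; omega)
    simp only [pow_zero] at H
    rw [← H]
    norm_num
  · -- k ≤ 1 : A returns the first split immediately, B clamps k to 1
    simp only [solveLoop]
    rw [if_pos (by omega : k - 1 ≤ 0), alt_one n k (by omega)]
    rfl
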